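-- pv_equiv track=rewrite | github.com/moremeds/apex | src/domain/signals/validation/confirmation.py | apply_majority_vote
-- ===== SOURCE A (Python) =====
-- from typing import List, Optional, Tuple
--
-- def apply_majority_vote(
--     signals_by_tf: List[List[bool]],
--     min_agree: Optional[int] = None,
-- ) -> List[bool]:
--     """
--     Apply majority vote rule.
--
--     Args:
--         signals_by_tf: List of signal lists for each TF
--         min_agree: Minimum TFs that must agree (default: majority)
--
--     Returns:
--         Combined signals (majority vote)
--     """
--     if not signals_by_tf:
--         return []
--
--     n_samples = len(signals_by_tf[0])
--     n_tfs = len(signals_by_tf)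
--
--     if any(len(s) != n_samples for s in signals_by_tf):
--         raise ValueError("All signal lists must have same length")
--
--     if min_agree is None:
--         min_agree = (n_tfs // 2) + 1  # Simple majority
--
--     result = []
--     for i in range(n_samples):
--         votes = sum(1 for signals in signals_by_tf if signals[i])
--         result.append(votes >= min_agree)
--
--     return result
-- ===== SOURCE B (Python) =====
-- from typing import List, Optional
--
--
-- def apply_majority_vote(
--     signals_by_tf: List[List[bool]],
--     min_agree: Optional[int] = None,
-- ) -> List[bool]:
--     """Column-wise accumulation: one maintained vote-count vector instead of a sum per sample."""
--     if not signals_by_tf: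
--         return []
--
--     n_samples = len(signals_by_tf[0])
--     if any(len(s) != n_samples for s in signals_by_tf):
--         raise ValueError("All signal lists must have same length")
--
--     if min_agree is None:
--         min_agree = (len(signals_by_tf) // 2) + 1
--
--     counts = [0] * n_samples
--     for signals in signals_by_tf:
--         counts = [c + 1 if v else c for c, v in zip(counts, signals)]
--
--     return [c >= min_agree for c in counts]
-- ===== Notes on version B (the rewrite author's own statement) =====
-- stated objective: alternative
-- what changed: B transposes the computation: instead of recomputing a per-sample sum over all timeframe lists for each index, it accumulates a single vote-count vector column-wise in one pass over the timeframe lists and thresholds it at the end.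
import Mathlib
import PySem

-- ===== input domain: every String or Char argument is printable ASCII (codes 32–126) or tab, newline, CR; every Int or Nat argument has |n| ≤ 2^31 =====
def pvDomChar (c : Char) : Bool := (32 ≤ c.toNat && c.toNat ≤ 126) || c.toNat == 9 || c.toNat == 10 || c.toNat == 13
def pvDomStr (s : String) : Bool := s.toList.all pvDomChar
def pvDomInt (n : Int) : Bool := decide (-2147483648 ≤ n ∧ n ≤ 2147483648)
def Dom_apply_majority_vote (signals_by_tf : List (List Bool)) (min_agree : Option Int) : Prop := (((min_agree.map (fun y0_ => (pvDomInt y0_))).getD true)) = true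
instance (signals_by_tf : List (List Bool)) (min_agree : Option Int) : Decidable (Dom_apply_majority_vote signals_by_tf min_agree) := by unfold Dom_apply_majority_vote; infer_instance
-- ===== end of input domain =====

-- B accumulates a single vote-count vector column-wise instead of recomputing a per-sample sum; same cost (alternative decomposition).

-- ===== PORT A =====
def apply_majority_vote (signals_by_tf : List (List Bool)) (min_agree : Option Int) : List Bool :=
  if signals_by_tf = [] then []
  else
    let n_samples : Int := (signals_by_tf.headD []).length
    let n_tfs : Int := signals_by_tf.length
    -- (length-mismatch ValueError is excluded by Pre_)
    let m : Int := min_agree.getD (PySem.Int.floordiv n_tfs 2 + 1)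
    (PySem.List.pyRange 0 n_samples 1).map (fun i =>
      decide (signals_by_tf.foldl
        (fun votes s => if PySem.List.pyGetD s i false then votes + 1 else votes) (0 : Int) ≥ m))

-- ===== PORT B =====
def apply_majority_vote_alt (signals_by_tf : List (List Bool)) (min_agree : Option Int) : List Bool :=
  match signals_by_tf with
  | [] => []
  | first :: _ =>
    let m : Int := min_agree.getD (PySem.Int.floordiv signals_by_tf.length 2 + 1)
    let counts : List Int := signals_by_tf.foldl
      (fun cs s => (cs.zip s).map (fun p => if p.2 then p.1 + 1 else p.1))
      (List.replicate first.length (0 : Int))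
    counts.map (fun c => decide (c ≥ m))

-- ===== PRECONDITION & SPEC =====
-- Pre_ excludes exactly the ragged inputs, on which A raises ValueError (no return value).
def Pre_apply_majority_vote (signals_by_tf : List (List Bool)) (min_agree : Option Int) : Prop :=
  ∀ s ∈ signals_by_tf, s.length = (signals_by_tf.headD []).length
instance (signals_by_tf : List (List Bool)) (min_agree : Option Int) : Decidable (Pre_apply_majority_vote signals_by_tf min_agree) := by unfold Pre_apply_majority_vote; infer_instance

def pvWitness_apply_majority_vote : List (List Bool) × Option Int :=
  ([[true, false, true], [true, true, false], [false, false, true]], none)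

def Spec_apply_majority_vote (signals_by_tf : List (List Bool)) (min_agree : Option Int) (out : List Bool) : Prop := out = apply_majority_vote_alt signals_by_tf min_agree
instance (signals_by_tf : List (List Bool)) (min_agree : Option Int) (out : List Bool) : Decidable (Spec_apply_majority_vote signals_by_tf min_agree out) := by unfold Spec_apply_majority_vote; infer_instance

-- ===== CLAIM (what is proved, stated in full; the proofs are below) =====
def Claim_equal_apply_majority_vote : Prop := ∀ (signals_by_tf : List (List Bool)) (min_agree : Option Int), Dom_apply_majority_vote signals_by_tf min_agree → Pre_apply_majority_vote signals_by_tf min_agree → Spec_apply_majority_vote signals_by_tf min_agree (apply_majority_vote signals_by_tf min_agree)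

-- ===== LEMMAS AND PROOFS =====

-- one column-update step of B's fold
def pvStep (cs : List Int) (s : List Bool) : List Int :=
  (cs.zip s).map (fun p => if p.2 then p.1 + 1 else p.1)

theorem pvStep_length (cs : List Int) (s : List Bool) (h : s.length = cs.length) :
    (pvStep cs s).length = cs.length := by
  simp [pvStep, h]

theorem pvStep_getElem (cs : List Int) (s : List Bool) (h : s.length = cs.length)
    (j : Nat) (hj : j < cs.length) :
    (pvStep cs s)[j]'(by rw [pvStep_length cs s h]; exact hj) =
      if s.getD j false then cs[j] + 1 else cs[j] := by
  have hj' : j < s.length := by omega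
  simp [pvStep, List.getElem_zip, List.getD_eq_getElem?_getD, List.getElem?_eq_getElem hj']

theorem foldl_pvStep_length (stf : List (List Bool)) (init : List Int)
    (h : ∀ s ∈ stf, s.length = init.length) :
    (stf.foldl pvStep init).length = init.length := by
  induction stf generalizing init with
  | nil => rfl
  | cons s tl ih =>
    have hs : s.length = init.length := h s (List.mem_cons_self ..)
    have := ih (pvStep init s) (by
      intro t ht
      rw [pvStep_length init s hs]
      exact h t (List.mem_cons_of_mem _ ht))
    simpa [List.foldl_cons, pvStep_length init s hs] using this

theorem foldl_pvStep_getElem? (stf : List (List Bool)) (init : List Int)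
    (h : ∀ s ∈ stf, s.length = init.length) (j : Nat) (hj : j < init.length) :
    (stf.foldl pvStep init)[j]? =
      some (stf.foldl (fun a s => if s.getD j false then a + 1 else a) (init[j])) := by
  induction stf generalizing init with
  | nil => simp [List.getElem?_eq_getElem hj]
  | cons s tl ih =>
    have hs : s.length = init.length := h s (List.mem_cons_self ..)
    have hlen : (pvStep init s).length = init.length := pvStep_length init s hs
    have h' : ∀ t ∈ tl, t.length = (pvStep init s).length := by
      intro t ht; rw [hlen]; exact h t (List.mem_cons_of_mem _ ht)
    have := ih (pvStep init s) h' (hlen ▸ hj)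
    rw [List.foldl_cons, List.foldl_cons, this, pvStep_getElem init s hs j hj]

-- ===== VERDICT (by name: the statement is the Claim_ definition above) =====
theorem apply_majority_vote_spec : Claim_equal_apply_majority_vote := by
  intro stf ma _hdom hpre
  unfold Spec_apply_majority_vote
  cases stf with
  | nil => rfl
  | cons first tl =>
    have hps : (fun (cs : List Int) (s : List Bool) =>
        (cs.zip s).map (fun p => if p.2 then p.1 + 1 else p.1)) = pvStep := rfl
    unfold apply_majority_vote apply_majority_vote_alt
    simp only [reduceCtorEq, if_false, hps, List.headD_cons]
    have hpre' : ∀ s ∈ first :: tl, s.length = (List.replicate first.length (0 : Int)).length := by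
      intro s hs; simpa using hpre s hs
    have hfl : ((first :: tl).foldl pvStep (List.replicate first.length (0 : Int))).length
        = first.length := by
      simpa using foldl_pvStep_length _ _ hpre'
    apply List.ext_getElem
    · rw [List.length_map, List.length_map, hfl, PySem.List.length_pyRange_one]; simp
    · intro j h1 h2
      have hj : j < first.length := by
        simpa [PySem.List.length_pyRange_one] using h1
      simp only [List.getElem_map]
      rw [PySem.List.getElem_pyRange_one]
      have hj' : j < ((first :: tl).foldl pvStep (List.replicate first.length (0 : Int))).length := by
        rw [hfl]; exact hj
      have hB := foldl_pvStep_getElem? (first :: tl) (List.replicate first.length (0 : Int))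
        hpre' j (by simpa using hj)
      rw [List.getElem?_eq_getElem hj'] at hB
      have hB' := Option.some.inj hB
      simp only [List.getElem_replicate] at hB'
      rw [hB']
      simp only [zero_add, PySem.List.pyGetD_natCast]
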